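-- pv_equiv track=rewrite | github.com/Tanvir-Alam-Roni/codeforces | problems/do_not_be_distracted.py | solution
-- ===== SOURCE A (Python) =====
-- def solution(n, task_list):
--     task = []
--     start_flag = 0
--     end_flag = 0
--     i = 0
--
--     while(i<n):
--         current_task = task_list[i]
--
--         if(start_flag==1 and current_task!=running_task):
--             start_flag=0
--
--         if(start_flag==0):
--             start_flag=1
--             running_task = task_list[i]
--             if current_task in task:
--                 return 'NO'
--             else:
--                 task.append(current_task)
--         i += 1
--
--     return 'YES'
-- ===== SOURCE B (Python) =====
-- def solution(n, task_list):
--     # Recursive decomposition: strip the leading constant run, then the run's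
--     # value must never occur again in the remaining suffix; recurse on the suffix.
--     def ok(ts):
--         if not ts:
--             return True
--         head = ts[0]
--         rest = ts[1:]
--         while rest and rest[0] == head:
--             rest = rest[1:]
--         return head not in rest and ok(rest)
--     return 'YES' if ok([task_list[i] for i in range(n)]) else 'NO'
-- ===== Notes on version B (the rewrite author's own statement) =====
-- stated objective: alternative
-- what changed: Replaces A's stateful scan (flag/running-task state and a growing seen-list checked by backward membership) with a recursive forward decomposition: strip the leading constant run, require its value to never occur again in the remaining suffix, and recurse on that suffix - no accumulator, no flags.
-- outside the precondition, e.g. on solution(84, ['O', '', 'N', 'c, NO', '']): A returns 'NO', B raises IndexError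
import Mathlib
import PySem

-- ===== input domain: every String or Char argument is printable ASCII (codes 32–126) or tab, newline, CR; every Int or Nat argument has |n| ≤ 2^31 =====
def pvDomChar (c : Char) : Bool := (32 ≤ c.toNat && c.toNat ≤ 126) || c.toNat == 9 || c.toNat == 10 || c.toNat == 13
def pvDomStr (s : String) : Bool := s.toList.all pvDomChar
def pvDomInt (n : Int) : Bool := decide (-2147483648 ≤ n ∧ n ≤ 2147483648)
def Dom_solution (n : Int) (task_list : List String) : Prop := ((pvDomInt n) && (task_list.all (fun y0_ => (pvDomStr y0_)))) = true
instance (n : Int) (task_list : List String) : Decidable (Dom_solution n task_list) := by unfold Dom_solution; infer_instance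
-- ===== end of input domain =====

-- B replaces A's stateful scan (flag/running-task state and a growing seen-list checked by
-- backward membership) with a recursive forward decomposition: strip the leading constant run,
-- require its value to never occur again in the remaining suffix, recurse (objective: alternative).

-- ===== PORT A =====
-- A's while loop: state (task, start_flag, running_task, i); running_task starts unbound,
-- modelled as "" — it is only read after being assigned (start_flag = 1).
def solutionAuxA (task_list : List String) (n : Int) (task : List String)
    (start_flag : Int) (running : String) (i : Int) : String :=
  if _h : i < n then
    let current := (PySem.List.pyGet? task_list i).getD ""   -- in range under Pre_solution
    let sf := if start_flag == 1 && current != running then 0 else start_flag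
    if sf == 0 then
      if current ∈ task then "NO"
      else solutionAuxA task_list n (task ++ [current]) 1 current (i + 1)
    else solutionAuxA task_list n task sf running (i + 1)
  else "YES"
termination_by (n - i).toNat
decreasing_by all_goals omega

def solution (n : Int) (task_list : List String) : String :=
  solutionAuxA task_list n [] 0 "" 0

-- ===== PORT B =====
-- 'while rest and rest[0] == head: rest = rest[1:]' of Source B, step for step
def stripRun (head : String) : List String → List String
  | [] => []
  | c :: tl => if c == head then stripRun head tl else c :: tl

theorem stripRun_length_le (h : String) : ∀ l : List String, (stripRun h l).length ≤ l.length
  | [] => le_refl _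
  | c :: tl => by
    unfold stripRun
    split
    · exact le_trans (stripRun_length_le h tl) (Nat.le_succ _)
    · exact le_refl _

-- 'ok' of Source B: head := ts[0]; rest := strip leading run; head not in rest and ok(rest)
def okB : List String → Bool
  | [] => true
  | head :: tl =>
    let rest := stripRun head tl
    !rest.contains head && okB rest
termination_by ts => ts.length
decreasing_by
  simpa using Nat.lt_succ_of_le (stripRun_length_le head tl)

def solution_alt (n : Int) (task_list : List String) : String :=
  let tasks := (PySem.List.pyRange 0 n 1).map (fun i => (PySem.List.pyGet? task_list i).getD "")
  if okB tasks then "YES" else "NO"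

-- ===== PRECONDITION & SPEC =====
-- Pre_ excludes n > len(task_list): there task_list[i] raises IndexError, except that A's early
-- 'NO' return can fire before the bad index is reached while B always builds all of range(n) and raises.
def Pre_solution (n : Int) (task_list : List String) : Prop := n ≤ task_list.length
instance (n : Int) (task_list : List String) : Decidable (Pre_solution n task_list) := by
  unfold Pre_solution; infer_instance

def pvWitness_solution : Int × List String := (3, ["a", "a", "b"])

def Spec_solution (n : Int) (task_list : List String) (out : String) : Prop := out = solution_alt n task_list
instance (n : Int) (task_list : List String) (out : String) : Decidable (Spec_solution n task_list out) := by unfold Spec_solution; infer_instance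

-- ===== CLAIM (what is proved, stated in full; the proofs are below) =====
def Claim_equal_solution : Prop := ∀ (n : Int) (task_list : List String), Dom_solution n task_list → Pre_solution n task_list → Spec_solution n task_list (solution n task_list)

-- ===== LEMMAS AND PROOFS =====

-- Proof-only model of A's loop after the first iteration (start_flag = 1 forever).
def goA : List String → List String → String → String
  | [], _, _ => "YES"
  | c :: rest, task, run =>
    if c = run then goA rest task run
    else if c ∈ task then "NO"
    else goA rest (task ++ [c]) c

-- Run heads from index 1 on: prev is the previous element.
def rleGo : List String → String → List String
  | [], _ => []
  | c :: rest, prev => (if c = prev then [] else [c]) ++ rleGo rest c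

-- Run heads of a whole list.
def headsB : List String → List String
  | [] => []
  | c :: rest => c :: rleGo rest c

theorem goA_eq_nodup (rest task : List String) (run : String) (htask : task.Nodup) :
    goA rest task run = if (task ++ rleGo rest run).Nodup then "YES" else "NO" := by
  induction rest generalizing task run with
  | nil => simp [goA, rleGo, htask]
  | cons c rest ih =>
    by_cases hc : c = run
    · simp [goA, rleGo, hc, ih _ _ htask]
    · by_cases hm : c ∈ task
      · have hnd : ¬ (task ++ c :: rleGo rest c).Nodup := fun h =>
          (List.disjoint_of_nodup_append h) hm (by simp)
        rw [goA]
        simp only [if_neg hc, if_pos hm]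
        rw [rleGo, if_neg hc]
        exact (if_neg hnd).symm
      · have htask' : (task ++ [c]).Nodup := by
          rw [List.nodup_append]
          refine ⟨htask, List.nodup_singleton c, ?_⟩
          intro a ha b hb
          rw [List.mem_singleton] at hb
          subst hb
          exact fun he => hm (he ▸ ha)
        rw [goA]
        simp only [if_neg hc, if_neg hm]
        rw [ih _ _ htask']
        simp [rleGo, hc, List.append_assoc]

theorem auxA_eq_goA (L : List String) (n : Int) (hn : n ≤ L.length)
    (task : List String) (run : String) (i : Int) (hi : 0 ≤ i) :
    solutionAuxA L n task 1 run i = goA ((L.take n.toNat).drop i.toNat) task run := by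
  by_cases h : i < n
  · have hilt : i.toNat < n.toNat := by omega
    have hiL : i.toNat < L.length := by omega
    have hget : (PySem.List.pyGet? L i).getD "" = L[i.toNat] := by
      rw [PySem.List.pyGet?_eq_some_getElem L hi (by omega)]; rfl
    have hdrop : (L.take n.toNat).drop i.toNat
        = L[i.toNat] :: (L.take n.toNat).drop (i.toNat + 1) := by
      have := List.drop_eq_getElem_cons (l := L.take n.toNat) (i := i.toNat) (by simp; omega)
      simpa [List.getElem_take] using this
    rw [solutionAuxA, dif_pos h, hdrop]
    simp only [hget]
    by_cases hc : L[i.toNat] = run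
    · have hsf : ((1 : Int) == 1 && L[i.toNat] != run) = false := by simp [hc]
      rw [hsf, if_neg Bool.false_ne_true, if_neg (by decide)]
      rw [goA, if_pos hc]
      rw [auxA_eq_goA L n hn task run (i + 1) (by omega)]
      have : (i + 1).toNat = i.toNat + 1 := by omega
      rw [this]
    · have hsf : ((1 : Int) == 1 && L[i.toNat] != run) = true := by simp [hc]
      rw [hsf, if_pos rfl, if_pos (show ((0:Int) == 0) = true from rfl)]
      rw [goA, if_neg hc]
      by_cases hm : L[i.toNat] ∈ task
      · simp [hm]
      · simp only [hm, if_false]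
        rw [auxA_eq_goA L n hn (task ++ [L[i.toNat]]) L[i.toNat] (i + 1) (by omega)]
        have : (i + 1).toNat = i.toNat + 1 := by omega
        rw [this]
  · have : (L.take n.toNat).drop i.toNat = [] := by
      apply List.drop_eq_nil_of_le
      simp
      omega
    rw [solutionAuxA, dif_neg h, this, goA]
termination_by (n - i).toNat
decreasing_by all_goals omega

-- B-side lemmas --------------------------------------------------------------

theorem rleGo_eq_headsB_stripRun : ∀ (tl : List String) (h : String),
    rleGo tl h = headsB (stripRun h tl)
  | [], _ => rfl
  | c :: tl, h => by
    unfold rleGo stripRun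
    by_cases hc : c = h
    · simp [hc, rleGo_eq_headsB_stripRun tl h]
    · simp [hc, headsB]

theorem mem_cons_rleGo : ∀ (tl : List String) (prev x : String),
    x ∈ prev :: rleGo tl prev ↔ x ∈ prev :: tl
  | [], _, _ => Iff.rfl
  | c :: tl, prev, x => by
    unfold rleGo
    by_cases hc : c = prev
    · subst hc
      rw [if_pos rfl, List.nil_append]
      constructor
      · intro h; rcases (mem_cons_rleGo tl c x).mp h with h | h
        · simp
        · simp [List.mem_cons.mp ((mem_cons_rleGo tl c x).mp ‹_›)]
      · intro h
        rcases List.mem_cons.mp h with h | h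
        · exact (mem_cons_rleGo tl c x).mpr (by simp [h])
        · exact (mem_cons_rleGo tl c x).mpr h
    · simp only [if_neg hc, List.cons_append, List.nil_append]
      constructor
      · intro h
        rcases List.mem_cons.mp h with h | h
        · simp [h]
        · rcases List.mem_cons.mp ((mem_cons_rleGo tl c x).mp h) with h | h
          · simp [h]
          · simp [h]
      · intro h
        rcases List.mem_cons.mp h with h | h
        · simp [h]
        · exact List.mem_cons_of_mem _ ((mem_cons_rleGo tl c x).mpr h)

theorem mem_headsB (l : List String) (x : String) : x ∈ headsB l ↔ x ∈ l := by
  cases l with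
  | nil => simp [headsB]
  | cons c r => exact mem_cons_rleGo r c x

theorem okB_iff_nodup : ∀ ts : List String, okB ts = true ↔ (headsB ts).Nodup := by
  intro ts
  induction ts using okB.induct with
  | case1 => simp [okB, headsB]
  | case2 head tl rest ih =>
    rw [okB]
    show (!rest.contains head && okB rest) = true ↔ (headsB (head :: tl)).Nodup
    have hheads : headsB (head :: tl) = head :: headsB rest := by
      show head :: rleGo tl head = _
      rw [rleGo_eq_headsB_stripRun]
    rw [hheads, List.nodup_cons, ← ih, mem_headsB]
    simp

theorem map_pyRange_eq_take (L : List String) (n : Int) (hn : n ≤ L.length)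
    (i : Int) (hi : 0 ≤ i) :
    (PySem.List.pyRange i n 1).map (fun j => (PySem.List.pyGet? L j).getD "")
      = (L.take n.toNat).drop i.toNat := by
  by_cases h : i < n
  · have hiL : i.toNat < L.length := by omega
    have hget : (PySem.List.pyGet? L i).getD "" = L[i.toNat] := by
      rw [PySem.List.pyGet?_eq_some_getElem L hi (by omega)]; rfl
    have hdrop : (L.take n.toNat).drop i.toNat
        = L[i.toNat] :: (L.take n.toNat).drop (i.toNat + 1) := by
      have := List.drop_eq_getElem_cons (l := L.take n.toNat) (i := i.toNat) (by simp; omega)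
      simpa [List.getElem_take] using this
    rw [PySem.List.pyRange_one_cons h, List.map_cons,
        map_pyRange_eq_take L n hn (i + 1) (by omega), hdrop]
    have : (i + 1).toNat = i.toNat + 1 := by omega
    rw [this, hget]
  · have hd : (L.take n.toNat).drop i.toNat = [] := by
      apply List.drop_eq_nil_of_le
      simp
      omega
    rw [PySem.List.pyRange_one_eq_nil (by omega), List.map_nil, hd]
termination_by (n - i).toNat
decreasing_by all_goals omega

theorem solution_alt_eq (n : Int) (L : List String) (hn : n ≤ L.length) :
    solution_alt n L = if (headsB (L.take n.toNat)).Nodup then "YES" else "NO" := by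
  unfold solution_alt
  have h0 := map_pyRange_eq_take L n hn 0 (le_refl 0)
  rw [show (0 : Int).toNat = 0 from rfl, List.drop_zero] at h0
  rw [h0]
  by_cases hnd : (headsB (L.take n.toNat)).Nodup
  · rw [if_pos ((okB_iff_nodup _).mpr hnd), if_pos hnd]
  · rw [if_neg (fun h => hnd ((okB_iff_nodup _).mp h)), if_neg hnd]

-- ===== VERDICT (by name: the statement is the Claim_ definition above) =====
theorem solution_spec : Claim_equal_solution := by
  intro n L _hdom hpre
  unfold Spec_solution
  have hn : n ≤ L.length := hpre
  rw [solution_alt_eq n L hn]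
  unfold solution
  by_cases hpos : 0 < n
  · have h0L : 0 < L.length := by omega
    have hget0 : (PySem.List.pyGet? L 0).getD "" = L[0] := by
      rw [PySem.List.pyGet?_eq_some_getElem L (by omega) (by omega)]; rfl
    have htake : L.take n.toNat = L[0] :: (L.take n.toNat).drop 1 := by
      have := List.drop_eq_getElem_cons (l := L.take n.toNat) (i := 0) (by simp; omega)
      simpa [List.getElem_take] using this
    rw [solutionAuxA, dif_pos hpos]
    simp only [hget0]
    norm_num
    rw [auxA_eq_goA L n hn [L[0]] L[0] 1 (by omega)]
    rw [goA_eq_nodup _ _ _ (by simp)]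
    rw [htake]
    simp [headsB]
  · rw [solutionAuxA, dif_neg (by omega)]
    have ht : L.take n.toNat = [] := by
      have : n.toNat = 0 := by omega
      simp [this]
    rw [ht]
    simp [headsB]
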